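-- pv_equiv track=rewrite | github.com/ferryman-charon/Advent-of-code-2024 | 2024/Aoc_2024_D03.py | cor_memory_ops
-- ===== SOURCE A (Python) =====
-- def digit_len(text:str, index:int, first:bool)-> int:
--     j = 0
--     while True:
--         if index + j + 1 > len(text):
--             return 0
--         if text[index + j].isdigit():
--             j += 1
--         else:
--             if first and text[index +j] == ',':
--                 return j + 1
--             elif not first and text[index +j] == ')':
--                 return j + 1
--             else:
--                 return 0
--
-- def cor_memory_ops(text:str)->int:
--     result = 0
--     i = 0
--     while i < len(text):
--         if text[i:i+4] == 'mul(':
--             i += 4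
--
--             l1 = digit_len(text,i, True)
--             if not l1: continue
--
--             l2 = digit_len(text, i+l1, False)
--             if not l2: continue
--             result += int(text[i:i+l1-1])*int(text[i+l1:i+l1+l2-1])
--             i += (l1+l2)
--         else:
--             i+=1
--
--     return result
-- ===== SOURCE B (Python) =====
-- def _segment_value(part):
--     # value contributed by one post-'mul(' segment: leading "digits,digits)" or nothing
--     a, _, rest = part.partition(',')
--     b, close, _ = rest.partition(')')
--     return int(a) * int(b) if a.isdigit() and b.isdigit() and close else 0
--
--
-- def cor_memory_ops(text: str) -> int:
--     return sum(map(_segment_value, text.split('mul(')[1:]))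
-- ===== Notes on version B (the rewrite author's own statement) =====
-- stated objective: simpler
-- what changed: B replaces A's one-character-at-a-time scanner (index arithmetic plus the digit_len helper called twice per candidate) by a staged decomposition: split the text on the literal 'mul(' delimiter once, parse each segment's head declaratively with str.partition, and sum the segment values (the per-character work moves into C-level str.split/partition).
-- outside the precondition, e.g. on cor_memory_ops('mul(,5)'): A raises ValueError, B returns 0; on cor_memory_ops('xmul(3,)x'): A raises ValueError, B returns 0
import Mathlib
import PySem

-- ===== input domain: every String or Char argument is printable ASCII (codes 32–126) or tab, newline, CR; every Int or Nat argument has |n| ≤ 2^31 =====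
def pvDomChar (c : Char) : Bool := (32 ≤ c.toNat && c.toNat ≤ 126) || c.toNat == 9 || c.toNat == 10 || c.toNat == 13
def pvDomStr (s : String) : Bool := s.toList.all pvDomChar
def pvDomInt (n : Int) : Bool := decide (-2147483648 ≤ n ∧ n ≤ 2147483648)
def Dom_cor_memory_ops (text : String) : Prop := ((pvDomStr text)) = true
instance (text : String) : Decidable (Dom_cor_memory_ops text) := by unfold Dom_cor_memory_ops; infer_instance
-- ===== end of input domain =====

-- B replaces A's single-pass character scanner (index arithmetic + the digit_len helper) by a
-- staged decomposition: split the text on the literal 'mul(' delimiter, parse each segment's head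
-- with partition, and sum the segment values (measured faster by a constant factor; return value only).

-- ===== PORT A =====
-- digit_len: count digits from the start of the remaining text, then require ',' (first) / ')'.
-- The while loop is rendered as the structural recursion over the suffix 's' = text[index:];
-- the bounds check 'index+j+1 > len(text)' is the [] case.
def digitLen (s : List Char) (first : Bool) : Nat :=
  match s with
  | [] => 0
  | c :: rest =>
    if PySem.Chars.isdigit c then
      match digitLen rest first with
      | 0 => 0
      | r + 1 => r + 2
    else
      if first && (c == ',') then 1
      else if !first && (c == ')') then 1
      else 0

-- main while loop of A over the suffix at index i; 'result' is A's accumulator.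
-- int(text[i:i+l1-1]) is PySem.Int.ofChars? on the same slice; '.getD 0' is unreachable on Pre_
-- (there the slice is a nonempty digit run, so int() returns; where it is empty Python raises, excluded).
def corAux (s : List Char) (result : Int) : Int :=
  match s with
  | [] => result
  | c :: rest =>
    if (c :: rest).take 4 = ['m', 'u', 'l', '('] then
      let s4 := rest.drop 3
      let l1 := digitLen s4 true
      if l1 = 0 then corAux s4 result
      else
        let l2 := digitLen (s4.drop l1) false
        if l2 = 0 then corAux s4 result
        else
          corAux (s4.drop (l1 + l2))
            (result +
              ((PySem.Int.ofChars? (s4.take (l1 - 1))).getD 0) *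
              ((PySem.Int.ofChars? ((s4.drop l1).take (l2 - 1))).getD 0))
    else corAux rest result
  termination_by s.length
  decreasing_by
  all_goals simp only [List.length_drop, List.length_cons]
  all_goals omega

def cor_memory_ops (text : String) : Int := corAux text.toList 0

-- ===== PORT B =====
-- text.split('mul(') rendered on List Char: parts separated by the literal pattern.
def splitMul (s : List Char) : List (List Char) :=
  match s with
  | [] => [[]]
  | c :: rest =>
    if (c :: rest).take 4 = ['m', 'u', 'l', '('] then
      [] :: splitMul (rest.drop 3)
    else
      match splitMul rest with
      | p :: ps => (c :: p) :: ps
      | [] => [[c]]   -- unreachable: splitMul never returns []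
  termination_by s.length
  decreasing_by
  all_goals simp only [List.length_drop, List.length_cons]
  all_goals omega

-- s.isdigit() : nonempty and all digits
def pyIsDigitStr (l : List Char) : Bool := !l.isEmpty && l.all PySem.Chars.isdigit

-- _segment_value(part): a, _, rest = part.partition(','); b, close, _ = rest.partition(')');
-- the two partitions are the takeWhile/dropWhile pairs; 'close' truthy = ')' found in rest.
def headVal (part : List Char) : Int :=
  let a := part.takeWhile (fun c => !(c == ','))
  let rest := (part.dropWhile (fun c => !(c == ','))).drop 1
  let b := rest.takeWhile (fun c => !(c == ')'))
  let close := !(rest.dropWhile (fun c => !(c == ')'))).isEmpty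
  if pyIsDigitStr a && pyIsDigitStr b && close then
    ((PySem.Int.ofChars? a).getD 0) * ((PySem.Int.ofChars? b).getD 0)
  else 0

-- sum(map(_segment_value, text.split('mul(')[1:]))
def cor_memory_ops_alt (text : String) : Int :=
  (((splitMul text.toList).drop 1).map headVal).sum

-- ===== PRECONDITION & SPEC =====
-- badAt t: the suffix t starts with 'mul(' followed by <digits>,<digits>) whose first or second
-- digit run is EMPTY — exactly there Python A evaluates int('') and raises ValueError.
def badAt (t : List Char) : Bool :=
  decide (t.take 4 = ['m', 'u', 'l', '(']) &&
    (match (t.drop 4).dropWhile PySem.Chars.isdigit with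
     | ',' :: w =>
       (match w.dropWhile PySem.Chars.isdigit with
        | ')' :: _ =>
          ((t.drop 4).takeWhile PySem.Chars.isdigit).isEmpty ||
            (w.takeWhile PySem.Chars.isdigit).isEmpty
        | _ => false)
     | _ => false)

-- Pre_ excludes exactly the inputs containing a 'mul(<digits>,<digits>)' occurrence with an empty
-- digit group (e.g. 'mul(,5)'), on which A raises ValueError from int('').
def Pre_cor_memory_ops (text : String) : Prop :=
  ∀ t ∈ text.toList.tails, badAt t = false

instance (text : String) : Decidable (Pre_cor_memory_ops text) := by
  unfold Pre_cor_memory_ops; infer_instance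

def pvWitness_cor_memory_ops : String := "xmul(2,4)y"

def Spec_cor_memory_ops (text : String) (out : Int) : Prop := out = cor_memory_ops_alt text
instance (text : String) (out : Int) : Decidable (Spec_cor_memory_ops text out) := by unfold Spec_cor_memory_ops; infer_instance

-- ===== CLAIM (what is proved, stated in full; the proofs are below) =====
def Claim_equal_cor_memory_ops : Prop := ∀ (text : String), Dom_cor_memory_ops text → Pre_cor_memory_ops text → Spec_cor_memory_ops text (cor_memory_ops text)

-- ===== LEMMAS AND PROOFS =====

-- proof-side characterisation of a successful 'mul(d1,d2)' parse at the head of a suffix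
def tryMatch (t : List Char) : Option (Int × List Char) :=
  let u := t.drop 4
  let d1 := u.takeWhile PySem.Chars.isdigit
  if d1 = [] then none
  else
    match u.dropWhile PySem.Chars.isdigit with
    | ',' :: w =>
      let d2 := w.takeWhile PySem.Chars.isdigit
      if d2 = [] then none
      else
        match w.dropWhile PySem.Chars.isdigit with
        | ')' :: r => some (((PySem.Int.ofChars? d1).getD 0) * ((PySem.Int.ofChars? d2).getD 0), r)
        | _ => none
    | _ => none

theorem digitLen_eq (s : List Char) (first : Bool) :
    digitLen s first =
      (match s.dropWhile PySem.Chars.isdigit with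
       | c :: _ =>
         if c = (if first then ',' else ')') then (s.takeWhile PySem.Chars.isdigit).length + 1
         else 0
       | [] => 0) := by
  induction s with
  | nil => rfl
  | cons c rest ih =>
    by_cases hd : PySem.Chars.isdigit c
    · rw [show digitLen (c :: rest) first = (match digitLen rest first with
        | 0 => 0 | r + 1 => r + 2) from by simp [digitLen, hd]]
      rw [List.dropWhile_cons_of_pos hd, List.takeWhile_cons_of_pos hd]
      rw [ih]
      cases hx : rest.dropWhile PySem.Chars.isdigit with
      | nil => simp
      | cons d tl =>
        by_cases hc : d = (if first then ',' else ')')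
        · simp [hc]
        · simp [hc]
    · rw [List.dropWhile_cons_of_neg hd, List.takeWhile_cons_of_neg hd]
      cases first with
      | true =>
        by_cases hc : c = ','
        · subst hc; simp [digitLen, hd]
        · simp [digitLen, hd, hc]
      | false =>
        by_cases hc : c = ')'
        · subst hc; simp [digitLen, hd]
        · simp [digitLen, hd, hc]

-- A's step at a 'mul(' occurrence, phrased through tryMatch
theorem corAux_step (t : List Char) (acc : Int)
    (h4 : t.take 4 = ['m', 'u', 'l', '(']) (hbad : badAt t = false) :
    corAux t acc =
      (match tryMatch t with
       | some vr => corAux vr.2 (acc + vr.1)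
       | none => corAux (t.drop 4) acc) := by
  have htu : t = 'm' :: 'u' :: 'l' :: '(' :: (t.drop 4) := by
    conv_lhs => rw [← List.take_append_drop 4 t]
    rw [h4]
    rfl
  set u0 := t.drop 4 with hu0_def
  rw [htu]
  rw [corAux]
  simp only [show ('m' :: 'u' :: 'l' :: '(' :: u0).take 4 = ['m', 'u', 'l', '('] from rfl,
    if_pos, List.drop]
  have hd40 : ('m' :: 'u' :: 'l' :: '(' :: u0).drop 4 = u0 := rfl
  rw [digitLen_eq]
  cases hv : u0.dropWhile PySem.Chars.isdigit with
  | nil =>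
    rw [show tryMatch ('m' :: 'u' :: 'l' :: '(' :: u0) = none from by
      unfold tryMatch; rw [hd40]; simp [hv]]
    simp
  | cons x w =>
    by_cases hx : x = ','
    · subst hx
      have hu0 : u0.takeWhile PySem.Chars.isdigit ++ ',' :: w = u0 :=
        hv ▸ List.takeWhile_append_dropWhile
      set d1 := u0.takeWhile PySem.Chars.isdigit with hd1
      have hdrop1 : u0.drop (d1.length + 1) = w := by
        conv_lhs => rw [← hu0]
        rw [List.drop_append]
        simp
      simp only [reduceIte, Nat.succ_ne_zero, if_false, hdrop1]
      rw [digitLen_eq]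
      cases hw : w.dropWhile PySem.Chars.isdigit with
      | nil =>
        rw [show tryMatch ('m' :: 'u' :: 'l' :: '(' :: u0) = none from by
          unfold tryMatch; rw [hd40]; simp [hv, hw]]
        simp
      | cons y r =>
        by_cases hy : y = ')'
        · subst hy
          have hw0 : w.takeWhile PySem.Chars.isdigit ++ ')' :: r = w :=
            hw ▸ List.takeWhile_append_dropWhile
          set d2 := w.takeWhile PySem.Chars.isdigit with hd2
          -- badAt t is false, so both digit groups are nonempty
          have hbad' : (d1.isEmpty || d2.isEmpty) = false := by
            rw [htu] at hbad
            unfold badAt at hbad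
            rw [hd40] at hbad
            simpa [hv, hw, hd1, hd2] using hbad
          have hne : d1 ≠ [] ∧ d2 ≠ [] := by
            constructor <;> [have := hbad'; have := hbad'] <;>
              simp at this <;> tauto
          have hdrop2 : List.drop (d2.length + 1) w = r := by
            conv_lhs => rw [← hw0]
            rw [List.drop_append]
            simp
          have htake1 : List.take d1.length u0 = d1 := by
            conv_lhs => rw [← hu0]
            rw [List.take_append]
            simp
          have htake2 : List.take d2.length w = d2 := by
            conv_lhs => rw [← hw0]
            rw [List.take_append]
            simp
          have hdropsum : List.drop (d1.length + 1 + (d2.length + 1)) u0 = r := by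
            rw [← List.drop_drop, hdrop1, hdrop2]
          rw [show tryMatch ('m' :: 'u' :: 'l' :: '(' :: u0) =
              some (((PySem.Int.ofChars? d1).getD 0) * ((PySem.Int.ofChars? d2).getD 0), r) from by
            unfold tryMatch; rw [hd40]; simp [hv, hw, ← hd1, ← hd2, hne.1, hne.2]]
          simp [htake1, htake2, hdropsum]
        · rw [show tryMatch ('m' :: 'u' :: 'l' :: '(' :: u0) = none from by
            unfold tryMatch; rw [hd40]; simp [hv, hw, hy]]
          simp [hy]
    · rw [show tryMatch ('m' :: 'u' :: 'l' :: '(' :: u0) = none from by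
        unfold tryMatch; rw [hd40]; simp [hv, hx]]
      simp [hx]

-- no 'mul(' occurrence starts among the first k positions
def noPat (u : List Char) (k : Nat) : Prop :=
  ∀ j < k, (u.drop j).take 4 ≠ ['m', 'u', 'l', '(']

theorem splitMul_ne_nil (u : List Char) : splitMul u ≠ [] := by
  induction u with
  | nil => rw [splitMul]; simp
  | cons c rest ih =>
    rw [splitMul]
    split
    · simp
    · cases h : splitMul rest with
      | nil => simp
      | cons p ps => simp

theorem splitMul_head (u : List Char) : ∀ p ps, splitMul u = p :: ps →
    u.take p.length = p ∧ noPat u p.length ∧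
      (p = u ∨ (u.drop p.length).take 4 = ['m', 'u', 'l', '(']) := by
  induction u with
  | nil =>
    intro p ps h
    rw [splitMul] at h
    cases h
    exact ⟨rfl, fun j hj => absurd hj (by simp), Or.inl rfl⟩
  | cons c rest ih =>
    intro p ps h
    rw [splitMul] at h
    split at h
    · next hpat =>
      cases h
      exact ⟨rfl, fun j hj => absurd hj (by simp), Or.inr (by simpa using hpat)⟩
    · next hpat =>
      cases hr : splitMul rest with
      | nil => exact absurd hr (splitMul_ne_nil rest)
      | cons p' ps' =>
        rw [hr] at h
        have h' : (c :: p') :: ps' = p :: ps := h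
        injection h' with h1 h2
        subst h1
        subst h2
        obtain ⟨htake, hnp, hlast⟩ := ih p' ps' hr
        refine ⟨by simpa using htake, ?_, ?_⟩
        · intro j hj
          cases j with
          | zero => simpa using hpat
          | succ m =>
            simp only [List.drop_succ_cons]
            exact hnp m (by simpa using hj)
        · cases hlast with
          | inl he => exact Or.inl (by rw [he])
          | inr hp => exact Or.inr (by simpa using hp)

theorem splitMul_drop_tail (u : List Char) : ∀ k, noPat u k →
    (splitMul (u.drop k)).drop 1 = (splitMul u).drop 1 := by
  induction u with
  | nil => intro k _; simp
  | cons c rest ih =>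
    intro k hk
    cases k with
    | zero => rfl
    | succ m =>
      have h0 : ¬ ((c :: rest).take 4 = ['m', 'u', 'l', '(']) := hk 0 (by omega)
      rw [List.drop_succ_cons]
      cases hr : splitMul rest with
      | nil => exact absurd hr (splitMul_ne_nil rest)
      | cons p ps =>
        have hs : splitMul (c :: rest) = (c :: p) :: ps := by
          rw [splitMul, if_neg h0, hr]
        have := ih m (fun j hj => by
          have := hk (j + 1) (by omega)
          simpa using this)
        rw [hr] at this
        rw [hs]
        simpa using this

theorem no_m_no_pat (l : List Char) (z : List Char) (hm : ∀ c ∈ l, c ≠ 'm') :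
    noPat (l ++ z) l.length := by
  induction l with
  | nil => intro j hj; simp at hj
  | cons c rest ih =>
    intro j hj
    cases j with
    | zero =>
      intro hc
      have : c = 'm' := by
        have := congrArg (fun t => t.head?) hc
        simpa using this
      exact hm c (by simp) this
    | succ m =>
      simp only [List.cons_append, List.drop_succ_cons]
      exact ih (fun c hc => hm c (by simp [hc])) m (by simpa using hj)

theorem digit_ne (c : Char) (h : PySem.Chars.isdigit c = true) :
    c ≠ ',' ∧ c ≠ ')' ∧ c ≠ 'm' :=
  ⟨fun e => absurd (e ▸ h) (by decide),
   fun e => absurd (e ▸ h) (by decide),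
   fun e => absurd (e ▸ h) (by decide)⟩

theorem takeWhile_append_all (f : Char → Bool) (l z : List Char) (h : ∀ c ∈ l, f c = true) :
    (l ++ z).takeWhile f = l ++ z.takeWhile f := by
  rw [List.takeWhile_append, if_pos]
  rw [List.takeWhile_eq_self_iff.2 h]

theorem dropWhile_append_all (f : Char → Bool) (l z : List Char) (h : ∀ c ∈ l, f c = true) :
    (l ++ z).dropWhile f = z.dropWhile f := by
  rw [List.dropWhile_append, if_pos]
  rw [List.dropWhile_eq_nil_iff.2 h]
  rfl

theorem dropWhile_head_false (f : Char → Bool) (l : List Char) (ch : Char) (pw : List Char)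
    (h : l.dropWhile f = ch :: pw) : f ch = false := by
  induction l with
  | nil => simp at h
  | cons x xs ih =>
    rw [List.dropWhile_cons] at h
    split at h
    · exact ih h
    · next hx =>
      cases h
      simpa using hx

-- the head part of splitMul u when a match sits at the start of u
theorem headVal_of_match (u p d1 d2 r : List Char) (ps : List (List Char))
    (hsplit : splitMul u = p :: ps)
    (hd1 : d1 ≠ []) (hd1d : ∀ c ∈ d1, PySem.Chars.isdigit c = true)
    (hd2 : d2 ≠ []) (hd2d : ∀ c ∈ d2, PySem.Chars.isdigit c = true)
    (hu : u = d1 ++ ',' :: d2 ++ ')' :: r) :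
    headVal p = ((PySem.Int.ofChars? d1).getD 0) * ((PySem.Int.ofChars? d2).getD 0) ∧
      (splitMul r).drop 1 = ps := by
  obtain ⟨htake, hnp, _⟩ := splitMul_head u p ps hsplit
  -- the match prefix l has no 'm'
  have hul : u = (d1 ++ ',' :: d2 ++ [')']) ++ r := by
    rw [hu]; simp
  set l : List Char := d1 ++ ',' :: d2 ++ [')'] with hl
  have hlm : ∀ c ∈ l, c ≠ 'm' := by
    intro c hc
    have hd : c ∈ d1 ∨ c ∈ d2 ∨ c = ',' ∨ c = ')' := by
      rw [hl] at hc
      simp at hc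
      tauto
    rcases hd with h | h | h | h
    · exact (digit_ne c (hd1d c h)).2.2
    · exact (digit_ne c (hd2d c h)).2.2
    · subst h; decide
    · subst h; decide
  have hnpl : noPat u l.length := hul ▸ no_m_no_pat l r hlm
  -- l.length ≤ p.length
  have hklen : l.length ≤ p.length := by
    by_contra hlt
    rw [Nat.not_le] at hlt
    obtain ⟨_, _, hlast⟩ := splitMul_head u p ps hsplit
    cases hlast with
    | inl he =>
      have : u.length = p.length := by rw [he]
      have : l.length ≤ u.length := by rw [hul]; simp
      omega
    | inr hp => exact hnpl p.length hlt hp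
  -- p = l ++ r.take (p.length - l.length)
  have hpeq : p = l ++ r.take (p.length - l.length) := by
    conv_lhs => rw [← htake]
    rw [hul, List.take_append, List.take_of_length_le hklen]
  set r' := r.take (p.length - l.length) with hr'
  have hpform : p = d1 ++ ',' :: (d2 ++ ')' :: r') := by
    rw [hpeq, hl]; simp
  -- compute headVal p
  have hcomma : ∀ c ∈ d1, (!(c == ',')) = true := by
    intro c hc
    simpa using (digit_ne c (hd1d c hc)).1
  have hparen : ∀ c ∈ d2, (!(c == ')')) = true := by
    intro c hc
    simpa using (digit_ne c (hd2d c hc)).2.1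
  have ha : p.takeWhile (fun c => !(c == ',')) = d1 := by
    rw [hpform, takeWhile_append_all _ _ _ hcomma]
    simp
  have hrest : (p.dropWhile (fun c => !(c == ','))).drop 1 = d2 ++ ')' :: r' := by
    rw [hpform, dropWhile_append_all _ _ _ hcomma]
    simp
  have hb : (d2 ++ ')' :: r').takeWhile (fun c => !(c == ')')) = d2 := by
    rw [takeWhile_append_all _ _ _ hparen]
    simp
  have hclose : (d2 ++ ')' :: r').dropWhile (fun c => !(c == ')')) = ')' :: r' := by
    rw [dropWhile_append_all _ _ _ hparen]
    simp
  constructor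
  · unfold headVal
    simp only [ha, hrest, hb, hclose]
    rw [if_pos]
    simp only [pyIsDigitStr, Bool.and_eq_true, Bool.not_eq_true']
    refine ⟨⟨⟨by simpa using hd1, List.all_eq_true.2 hd1d⟩, by simpa using hd2,
      List.all_eq_true.2 hd2d⟩, by simp⟩
  · -- remaining parts: drop the match prefix
    have h1 : (splitMul (u.drop l.length)).drop 1 = (splitMul u).drop 1 :=
      splitMul_drop_tail u l.length hnpl
    have h2 : u.drop l.length = r := by
      rw [hul, List.drop_left]
    rw [h2] at h1
    rw [h1, hsplit]
    rfl

-- if the head segment parses in B, then tryMatch succeeds at the start of u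
theorem tryMatch_isSome_of_headOk (u p : List Char) (ps : List (List Char))
    (hsplit : splitMul u = p :: ps)
    (hok : (pyIsDigitStr (p.takeWhile (fun c => !(c == ','))) &&
            pyIsDigitStr (((p.dropWhile (fun c => !(c == ','))).drop 1).takeWhile (fun c => !(c == ')'))) &&
            !(((p.dropWhile (fun c => !(c == ','))).drop 1).dropWhile (fun c => !(c == ')'))).isEmpty) = true) :
    (tryMatch ('m' :: 'u' :: 'l' :: '(' :: u)).isSome := by
  obtain ⟨htake, _, _⟩ := splitMul_head u p ps hsplit
  simp only [Bool.and_eq_true, pyIsDigitStr, Bool.not_eq_true'] at hok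
  obtain ⟨⟨⟨ha1, ha2⟩, hb1, hb2⟩, hc⟩ := hok
  set a := p.takeWhile (fun c => !(c == ',')) with hadef
  set rest := (p.dropWhile (fun c => !(c == ','))).drop 1 with hrestdef
  set b := rest.takeWhile (fun c => !(c == ')')) with hbdef
  -- the comma was found: dropWhile ≠ []
  have hdw : p.dropWhile (fun c => !(c == ',')) ≠ [] := by
    intro he
    have hb0 : b = [] := by rw [hbdef, hrestdef, he]; rfl
    rw [hb0] at hb1
    simp at hb1
  obtain ⟨ch, pw, hcons⟩ := List.exists_cons_of_ne_nil hdw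
  have hch : ch = ',' := by
    have := dropWhile_head_false (fun c => !(c == ',')) p ch pw hcons
    simpa using this
  subst hch
  have hp : p = a ++ ',' :: pw := by
    conv_lhs => rw [← List.takeWhile_append_dropWhile (p := fun c => !(c == ',')) (l := p)]
    rw [hcons]
  have hrest : rest = pw := by rw [hrestdef, hcons]; rfl
  -- the paren was found in rest
  have hdw2 : rest.dropWhile (fun c => !(c == ')')) ≠ [] := by
    intro he
    rw [he] at hc
    simp at hc
  obtain ⟨ch2, pw2, hcons2⟩ := List.exists_cons_of_ne_nil hdw2
  have hch2 : ch2 = ')' := by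
    have := dropWhile_head_false (fun c => !(c == ')')) rest ch2 pw2 hcons2
    simpa using this
  subst hch2
  have hpw : pw = b ++ ')' :: pw2 := by
    conv_lhs => rw [← hrest]
    conv_lhs => rw [← List.takeWhile_append_dropWhile (p := fun c => !(c == ')')) (l := rest)]
    rw [hcons2, hbdef]
  -- u = p ++ q
  obtain ⟨q, hq⟩ : ∃ q, u = p ++ q :=
    ⟨u.drop p.length, by
      conv_lhs => rw [← List.take_append_drop p.length u]
      rw [htake]⟩
  have hadig : ∀ c ∈ a, PySem.Chars.isdigit c = true := List.all_eq_true.1 ha2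
  have hbdig : ∀ c ∈ b, PySem.Chars.isdigit c = true := List.all_eq_true.1 hb2
  have hu : u = a ++ ',' :: (b ++ ')' :: (pw2 ++ q)) := by
    rw [hq, hp, hpw]
    simp
  -- now evaluate tryMatch
  have hdc : PySem.Chars.isdigit ',' = false := by decide
  have hdp : PySem.Chars.isdigit ')' = false := by decide
  have ht1 : u.takeWhile PySem.Chars.isdigit = a := by
    rw [hu, takeWhile_append_all _ _ _ hadig]
    simp [hdc]
  have ht2 : u.dropWhile PySem.Chars.isdigit = ',' :: (b ++ ')' :: (pw2 ++ q)) := by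
    rw [hu, dropWhile_append_all _ _ _ hadig]
    simp [hdc]
  have ht3 : (b ++ ')' :: (pw2 ++ q)).takeWhile PySem.Chars.isdigit = b := by
    rw [takeWhile_append_all _ _ _ hbdig]
    simp [hdp]
  have ht4 : (b ++ ')' :: (pw2 ++ q)).dropWhile PySem.Chars.isdigit = ')' :: (pw2 ++ q) := by
    rw [dropWhile_append_all _ _ _ hbdig]
    simp [hdp]
  unfold tryMatch
  have hd40 : ('m' :: 'u' :: 'l' :: '(' :: u).drop 4 = u := rfl
  rw [hd40]
  simp [ht1, ht2, ht3, ht4, by simpa using ha1, by simpa using hb1]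

-- B's head segment value is 0 whenever tryMatch fails
theorem headVal_of_none (u p : List Char) (ps : List (List Char))
    (hsplit : splitMul u = p :: ps)
    (hnone : tryMatch ('m' :: 'u' :: 'l' :: '(' :: u) = none) :
    headVal p = 0 := by
  by_cases hok : (pyIsDigitStr (p.takeWhile (fun c => !(c == ','))) &&
      pyIsDigitStr (((p.dropWhile (fun c => !(c == ','))).drop 1).takeWhile (fun c => !(c == ')'))) &&
      !(((p.dropWhile (fun c => !(c == ','))).drop 1).dropWhile (fun c => !(c == ')'))).isEmpty) = true
  · exact absurd (tryMatch_isSome_of_headOk u p ps hsplit hok)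
      (by rw [hnone]; simp)
  · exact if_neg hok

-- decompose a successful tryMatch
theorem tryMatch_decomp (u : List Char) (vr : Int × List Char)
    (h : tryMatch ('m' :: 'u' :: 'l' :: '(' :: u) = some vr) :
    ∃ d1 d2, d1 ≠ [] ∧ (∀ c ∈ d1, PySem.Chars.isdigit c = true) ∧
      d2 ≠ [] ∧ (∀ c ∈ d2, PySem.Chars.isdigit c = true) ∧
      u = d1 ++ ',' :: d2 ++ ')' :: vr.2 ∧
      vr.1 = ((PySem.Int.ofChars? d1).getD 0) * ((PySem.Int.ofChars? d2).getD 0) := by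
  unfold tryMatch at h
  have hd40 : ('m' :: 'u' :: 'l' :: '(' :: u).drop 4 = u := rfl
  rw [hd40] at h
  simp only at h
  split_ifs at h with h1
  revert h
  split
  · next w hv =>
    intro h
    split_ifs at h with h2
    revert h
    split
    · next r hx =>
      intro h
      cases h
      refine ⟨u.takeWhile PySem.Chars.isdigit, w.takeWhile PySem.Chars.isdigit,
        h1, List.all_eq_true.1 List.all_takeWhile, h2, List.all_eq_true.1 List.all_takeWhile, ?_, rfl⟩
      have hw' : w = w.takeWhile PySem.Chars.isdigit ++ ')' :: r := by
        conv_lhs => rw [← List.takeWhile_append_dropWhile (p := PySem.Chars.isdigit) (l := w)]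
        rw [hx]
      conv_lhs => rw [← List.takeWhile_append_dropWhile (p := PySem.Chars.isdigit) (l := u)]
      rw [hv]
      conv_lhs => rw [hw']
      simp
    · intro h; cases h
  · intro h; cases h

theorem main_equiv (n : Nat) : ∀ (s : List Char), s.length ≤ n →
    (∀ t ∈ s.tails, badAt t = false) → ∀ acc : Int,
    corAux s acc = acc + (((splitMul s).drop 1).map headVal).sum := by
  induction n with
  | zero =>
    intro s hlen _ acc
    have hs : s = [] := List.eq_nil_of_length_eq_zero (Nat.le_zero.1 hlen)
    subst hs
    rw [corAux, splitMul]
    simp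
  | succ n ih =>
    intro s hlen hpre acc
    by_cases h4 : s.take 4 = ['m', 'u', 'l', '(']
    · -- s = 'mul(' ++ u
      have htu : s = 'm' :: 'u' :: 'l' :: '(' :: (s.drop 4) := by
        conv_lhs => rw [← List.take_append_drop 4 s]
        rw [h4]
        rfl
      set u := s.drop 4 with hu_def
      have hslen : 4 ≤ s.length := by
        have := congrArg List.length h4
        simp at this
        omega
      have hsplit_s : splitMul s = [] :: splitMul u := by
        rw [htu, splitMul]
        norm_num
      obtain ⟨p, ps, hsplit⟩ : ∃ p ps, splitMul u = p :: ps := by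
        cases hx : splitMul u with
        | nil => exact absurd hx (splitMul_ne_nil u)
        | cons p ps => exact ⟨p, ps, rfl⟩
      have hbt : badAt s = false := hpre s (by simp [List.mem_tails])
      have hstep := corAux_step s acc h4 hbt
      have husuffix : u <:+ s := List.drop_suffix 4 s
      have hpre_u : ∀ t ∈ u.tails, badAt t = false := by
        intro t ht
        exact hpre t ((List.mem_tails _ _).2 (((List.mem_tails _ _).1 ht).trans husuffix))
      cases hm : tryMatch s with
      | some vr =>
        have hstep2 : corAux s acc = corAux vr.2 (acc + vr.1) := by rw [hstep, hm]
        have hm' : tryMatch ('m' :: 'u' :: 'l' :: '(' :: u) = some vr := by rw [← htu]; exact hm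
        obtain ⟨d1, d2, hne1, hdig1, hne2, hdig2, hu, hv1⟩ := tryMatch_decomp u vr hm'
        obtain ⟨hhv, hps⟩ := headVal_of_match u p d1 d2 vr.2 ps hsplit hne1 hdig1 hne2 hdig2 hu
        have hsuf2 : vr.2 <:+ u := ⟨d1 ++ ',' :: d2 ++ [')'], by rw [hu]; simp⟩
        have hlen2 : vr.2.length ≤ n := by
          have h1 := hsuf2.length_le
          have h2 : u.length = s.length - 4 := by rw [hu_def]; simp
          omega
        have ihv := ih vr.2 hlen2
          (fun t ht => hpre t ((List.mem_tails _ _).2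
            ((((List.mem_tails _ _).1 ht).trans hsuf2).trans husuffix))) (acc + vr.1)
        rw [hstep2, ihv, hsplit_s]
        simp only [List.drop_succ_cons, List.drop_zero, hsplit, List.map_cons, List.sum_cons, hps, hhv, hv1]
        ring
      | none =>
        have hstep2 : corAux s acc = corAux (s.drop 4) acc := by rw [hstep, hm]
        have hm' : tryMatch ('m' :: 'u' :: 'l' :: '(' :: u) = none := by rw [← htu]; exact hm
        have hhv := headVal_of_none u p ps hsplit hm'
        have hlen2 : u.length ≤ n := by
          have : u.length = s.length - 4 := by rw [hu_def]; simp
          omega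
        have ihv := ih u hlen2 hpre_u acc
        rw [hstep2, ihv, hsplit_s]
        simp only [List.drop_succ_cons, List.drop_zero, hsplit, List.map_cons, List.sum_cons, hhv]
        ring
    · cases s with
      | nil =>
        rw [corAux, splitMul]
        simp
      | cons c rest =>
        have hstep : corAux (c :: rest) acc = corAux rest acc := by
          rw [corAux]
          rw [if_neg h4]
        obtain ⟨p, ps, hsplit⟩ : ∃ p ps, splitMul rest = p :: ps := by
          cases hx : splitMul rest with
          | nil => exact absurd hx (splitMul_ne_nil rest)
          | cons p ps => exact ⟨p, ps, rfl⟩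
        have hsplit_s : splitMul (c :: rest) = (c :: p) :: ps := by
          rw [splitMul]
          simp only [h4, if_false, hsplit]
        have ihv := ih rest (by simp at hlen ⊢; omega)
          (fun t ht => hpre t ((List.mem_tails _ _).2
            (((List.mem_tails _ _).1 ht).trans (List.suffix_cons c rest)))) acc
        rw [hstep, ihv, hsplit_s, hsplit]
        simp

-- ===== VERDICT (by name: the statement is the Claim_ definition above) =====
theorem cor_memory_ops_spec : Claim_equal_cor_memory_ops := by
  intro text _ hpre
  unfold Spec_cor_memory_ops cor_memory_ops cor_memory_ops_alt
  rw [main_equiv text.toList.length text.toList le_rfl hpre 0]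
  simp
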